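-- pv_equiv track=rewrite | github.com/Fondamenti18/fondamenti-di-programmazione | students/1809715/homework04/program01.py | get_sottoalbero
-- ===== SOURCE A (Python) =====
-- def get_sottoalbero(d,x):
--
--     r = {}
--
--     if x not in d.keys():
--         return r
--
--     r[x] = d[x]
--     for l in d[x]:
--         r.update(get_sottoalbero(d, l))
--
--     return r
-- ===== SOURCE B (Python) =====
-- def get_sottoalbero(d, x):
--     r = {}
--     stack = [x]
--     while stack:
--         n = stack.pop(0)
--         if n in r or n not in d:
--             continue
--         r[n] = d[n]
--         stack[:0] = d[n]
--     return r
-- ===== Notes on version B (the rewrite author's own statement) =====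
-- stated objective: alternative
-- what changed: A recursively builds a fresh dict per subtree and merges child results with dict.update, re-expanding shared descendants; B is an iterative worklist DFS with an explicit stack and a single shared dict with a visited check, so every node is expanded at most once and there is no recursion.
import Mathlib
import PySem

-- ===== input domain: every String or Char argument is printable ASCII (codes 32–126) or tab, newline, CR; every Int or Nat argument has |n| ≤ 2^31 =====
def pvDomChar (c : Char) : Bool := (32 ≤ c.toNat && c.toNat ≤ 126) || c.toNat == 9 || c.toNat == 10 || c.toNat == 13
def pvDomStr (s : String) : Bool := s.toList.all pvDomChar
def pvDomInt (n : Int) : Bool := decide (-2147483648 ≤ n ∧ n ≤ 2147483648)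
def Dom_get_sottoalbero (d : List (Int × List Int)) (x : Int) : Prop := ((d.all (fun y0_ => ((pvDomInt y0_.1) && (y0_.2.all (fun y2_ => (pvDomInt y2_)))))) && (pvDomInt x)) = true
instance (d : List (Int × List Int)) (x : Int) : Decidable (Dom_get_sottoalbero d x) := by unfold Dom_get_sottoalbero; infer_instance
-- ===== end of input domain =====

-- B replaces A's recursive build-and-merge of per-subtree dicts by an iterative worklist DFS:
-- an explicit stack and one shared dict with a visited check, no recursion.

-- ===== PORT A =====
-- fuel `d.length + 1` bounds A's recursion depth whenever no cycle is reachable (Pre_ below);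
-- it is a totality device only, never reached inside Pre_.
def goA (dd : PySem.Dict Int (List Int)) : Nat → Int → PySem.Dict Int (List Int)
  | 0, _ => PySem.Dict.empty
  | f + 1, x =>
    if !(dd.contains x) then PySem.Dict.empty
    else
      (dd.getD x []).foldl (fun r l => r.update (goA dd f l).items)
        ((PySem.Dict.empty).insert x (dd.getD x []))

def get_sottoalbero (d : List (Int × List Int)) (x : Int) : List (Int × List Int) :=
  (goA (PySem.Dict.ofList d) (d.length + 1) x).items

-- ===== PORT B =====
-- B's while-loop over the explicit stack, stepped with fuel; each iteration either consumes a
-- stack entry (skip) or consumes a stack entry, marks a fresh key and prepends its children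
-- (visit), so the generous fuel below is never exhausted (proved in goS_steps below).
def goS (dd : PySem.Dict Int (List Int)) : Nat → List Int → PySem.Dict Int (List Int) → PySem.Dict Int (List Int)
  | 0, _, r => r
  | _ + 1, [], r => r
  | f + 1, n :: stack, r =>
    if r.contains n || !(dd.contains n) then goS dd f stack r
    else goS dd f (dd.getD n [] ++ stack) (r.insert n (dd.getD n []))

def get_sottoalbero_alt (d : List (Int × List Int)) (x : Int) : List (Int × List Int) :=
  (goS (PySem.Dict.ofList d)
    (((PySem.Dict.ofList d).items.map (fun p => p.2.length + 1)).sum + 1)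
    [x] PySem.Dict.empty).items

-- ===== PRECONDITION & SPEC =====
def pvChildren (d : List (Int × List Int)) (n : Int) : List Int :=
  (PySem.Dict.ofList d).getD n []

-- all nodes reachable from n by at most f edges
def pvReachN (d : List (Int × List Int)) : Nat → Int → List Int
  | 0, n => [n]
  | f + 1, n => n :: (pvChildren d n).flatMap (pvReachN d f)

-- Pre_ excludes exactly the inputs where a cycle in d is reachable from x: there Python A
-- recurses forever (RecursionError) and returns nothing.
def Pre_get_sottoalbero (d : List (Int × List Int)) (x : Int) : Prop :=
  ∀ k ∈ pvReachN d d.length x, ∀ c ∈ pvChildren d k, k ∉ pvReachN d d.length c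

instance (d : List (Int × List Int)) (x : Int) : Decidable (Pre_get_sottoalbero d x) := by
  unfold Pre_get_sottoalbero; infer_instance

def pvWitness_get_sottoalbero : (List (Int × List Int)) × Int := ([(1, [2, 3]), (2, [3]), (3, [])], 1)

def Spec_get_sottoalbero (d : List (Int × List Int)) (x : Int) (out : List (Int × List Int)) : Prop := out = get_sottoalbero_alt d x
instance (d : List (Int × List Int)) (x : Int) (out : List (Int × List Int)) : Decidable (Spec_get_sottoalbero d x out) := by unfold Spec_get_sottoalbero; infer_instance

-- ===== CLAIM (what is proved, stated in full; the proofs are below) =====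
def Claim_equal_get_sottoalbero : Prop := ∀ (d : List (Int × List Int)) (x : Int), Dom_get_sottoalbero d x → Pre_get_sottoalbero d x → Spec_get_sottoalbero d x (get_sottoalbero d x)

-- ===== LEMMAS AND PROOFS =====

-- proof device: the recursive one-node-at-a-time DFS; B's stack machine is shown equal to a
-- fold of this function over the stack, and this function equal to A's update of goA's items.
def goB (dd : PySem.Dict Int (List Int)) : Nat → Int → PySem.Dict Int (List Int) → PySem.Dict Int (List Int)
  | 0, _, r => r
  | f + 1, n, r =>
    if r.contains n || !(dd.contains n) then r
    else
      (dd.getD n []).foldl (fun r c => goB dd f c r) (r.insert n (dd.getD n []))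

theorem bool_false_of_not_true {b : Bool} (h : ¬ b = true) : b = false := by
  cases b
  · rfl
  · exact absurd rfl h

-- reachability along edges of dd (unbounded)
inductive KReach (dd : PySem.Dict Int (List Int)) : Int → Int → Prop
  | refl (n : Int) : KReach dd n n
  | step (n c k : Int) (hn : dd.contains n = true) (hc : c ∈ dd.getD n []) (h : KReach dd c k) : KReach dd n k

theorem kreach_snoc (dd : PySem.Dict Int (List Int)) {a b c : Int}
    (h : KReach dd a b) (hb : dd.contains b = true) (hc : c ∈ dd.getD b []) : KReach dd a c := by
  induction h with
  | refl n => exact KReach.step n c c hb hc (KReach.refl c)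
  | step n m k hn hm _ ih => exact KReach.step n m c hn hm (ih hb hc)

theorem kreach_key {dd : PySem.Dict Int (List Int)} {a b : Int}
    (h : KReach dd a b) (hb : dd.contains b = true) : dd.contains a = true := by
  cases h with
  | refl => exact hb
  | step _ _ _ hn _ _ => exact hn

-- explicit paths
def IsPath (dd : PySem.Dict Int (List Int)) : Int → List Int → Int → Prop
  | a, [], b => a = b
  | a, c :: p, b => dd.contains a = true ∧ c ∈ dd.getD a [] ∧ IsPath dd c p b

theorem kreach_path (dd : PySem.Dict Int (List Int)) {a b : Int} (h : KReach dd a b) :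
    ∃ p, IsPath dd a p b := by
  induction h with
  | refl n => exact ⟨[], rfl⟩
  | step n c k hn hc _ ih =>
    obtain ⟨p, hp⟩ := ih
    exact ⟨c :: p, hn, hc, hp⟩

theorem path_append (dd : PySem.Dict Int (List Int)) (p1 : List Int) :
    ∀ (a b : Int) (p2 : List Int), IsPath dd a (p1 ++ p2) b → ∃ m, IsPath dd a p1 m ∧ IsPath dd m p2 b := by
  induction p1 with
  | nil => exact fun a b p2 h => ⟨a, rfl, h⟩
  | cons c p1' ih =>
    intro a b p2 h
    obtain ⟨ha, hc, hp⟩ := h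
    obtain ⟨m, h1, h2⟩ := ih c b p2 hp
    exact ⟨m, ⟨ha, hc, h1⟩, h2⟩

theorem path_nodes_keys (dd : PySem.Dict Int (List Int)) (p : List Int) :
    ∀ a b, IsPath dd a p b → ∀ v ∈ (a :: p).dropLast, dd.contains v = true := by
  induction p with
  | nil => intro a b _ v hv; simp at hv
  | cons c p' ih =>
    intro a b h v hv
    obtain ⟨ha, hc, hp⟩ := h
    rw [List.dropLast_cons₂] at hv
    rcases List.mem_cons.mp hv with hv | hv
    · exact hv ▸ ha
    · exact ih c b hp v hv

-- every path can be replaced by one with no repeated nodes, using only nodes of the original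
theorem path_nodup (dd : PySem.Dict Int (List Int)) :
    ∀ (N : Nat) (p : List Int) (a b : Int), p.length ≤ N → IsPath dd a p b →
      ∃ q, IsPath dd a q b ∧ (a :: q).Nodup ∧ q ⊆ p := by
  intro N
  induction N with
  | zero =>
    intro p a b hlen h
    cases p with
    | nil => exact ⟨[], h, List.nodup_singleton a, fun _ h => h⟩
    | cons c p' => simp at hlen
  | succ N ih =>
    intro p a b hlen h
    by_cases hmem : a ∈ p
    · obtain ⟨p1, p2, rfl⟩ := List.append_of_mem hmem
      obtain ⟨m, _, h2⟩ := path_append dd p1 a b (a :: p2) h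
      obtain ⟨_, _, hp2⟩ := h2
      have hlen2 : p2.length ≤ N := by
        simp [List.length_append] at hlen
        omega
      obtain ⟨q, hq, hnd, hsub⟩ := ih p2 a b hlen2 hp2
      refine ⟨q, hq, hnd, fun y hy => ?_⟩
      have := hsub hy
      simp [List.mem_append]
      tauto
    · cases p with
      | nil => exact ⟨[], h, List.nodup_singleton a, fun _ h => h⟩
      | cons c p' =>
        obtain ⟨ha, hc, hp⟩ := h
        have hlen' : p'.length ≤ N := by simp at hlen; omega
        obtain ⟨q', hq', hnd', hsub'⟩ := ih p' c b hlen' hp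
        refine ⟨c :: q', ⟨ha, hc, hq'⟩, ?_, ?_⟩
        · refine List.nodup_cons.mpr ⟨?_, hnd'⟩
          intro hin
          rcases List.mem_cons.mp hin with h1 | h1
          · exact hmem (h1 ▸ List.mem_cons_self ..)
          · exact hmem (List.mem_cons_of_mem c (hsub' h1))
        · intro y hy
          rcases List.mem_cons.mp hy with h1 | h1
          · exact h1 ▸ List.mem_cons_self ..
          · exact List.mem_cons_of_mem c (hsub' h1)

theorem reachN_self (d : List (Int × List Int)) (f : Nat) (a : Int) : a ∈ pvReachN d f a := by
  cases f <;> simp [pvReachN]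

theorem path_reachN (d : List (Int × List Int)) :
    ∀ (q : List Int) (a b : Int) (f : Nat), IsPath (PySem.Dict.ofList d) a q b → q.length ≤ f →
      b ∈ pvReachN d f a := by
  intro q
  induction q with
  | nil =>
    intro a b f h _
    have : a = b := h
    exact this ▸ reachN_self d f a
  | cons c q' ih =>
    intro a b f h hlen
    obtain ⟨_, hc, hp⟩ := h
    cases f with
    | zero => simp at hlen
    | succ f' =>
      have hb := ih c b f' hp (by simp at hlen; omega)
      rw [pvReachN]
      exact List.mem_cons_of_mem _ (List.mem_flatMap.mpr ⟨c, hc, hb⟩)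

theorem keys_ofList_sub (d : List (Int × List Int)) :
    ∀ k ∈ (PySem.Dict.ofList d).keys, k ∈ d.map Prod.fst := by
  intro k hk
  have h1 : (PySem.Dict.ofList d).keys =
      PySem.Set.update ((PySem.Dict.empty : PySem.Dict Int (List Int)).keys) (d.map Prod.fst) :=
    PySem.Dict.keys_foldl_insert_key d Prod.fst (fun _ x => x.2) PySem.Dict.empty
  rw [h1] at hk
  have h2 : PySem.Set.update ((PySem.Dict.empty : PySem.Dict Int (List Int)).keys) (d.map Prod.fst) =
      PySem.Set.ofList (d.map Prod.fst) := PySem.Set.update_nil_left _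
  rw [h2] at hk
  exact (PySem.Set.mem_ofList _ _).mp hk

theorem keys_ofList_len (d : List (Int × List Int)) :
    (PySem.Dict.ofList d).keys.length ≤ d.length := by
  have hnd : (PySem.Dict.ofList d).keys.Nodup := PySem.Dict.nodup_keys_ofList d
  calc (PySem.Dict.ofList d).keys.length
      = (PySem.Dict.ofList d).keys.toFinset.card := (List.toFinset_card_of_nodup hnd).symm
    _ ≤ (d.map Prod.fst).toFinset.card := Finset.card_le_card (fun y hy => by
        simp only [List.mem_toFinset] at *
        exact keys_ofList_sub d y hy)
    _ ≤ (d.map Prod.fst).length := List.toFinset_card_le _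
    _ = d.length := List.length_map ..

theorem kreach_reachN (d : List (Int × List Int)) {a b : Int}
    (h : KReach (PySem.Dict.ofList d) a b) : b ∈ pvReachN d d.length a := by
  obtain ⟨p, hp⟩ := kreach_path _ h
  obtain ⟨q, hq, hnd, _⟩ := path_nodup (PySem.Dict.ofList d) p.length p a b le_rfl hp
  refine path_reachN d q a b d.length hq ?_
  have hkeys : ∀ v ∈ (a :: q).dropLast, v ∈ (PySem.Dict.ofList d).keys := by
    intro v hv
    exact (PySem.Dict.contains_iff_mem_keys _ _).mp (path_nodes_keys _ q a b hq v hv)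
  have hnd' : (a :: q).dropLast.Nodup := hnd.sublist (List.dropLast_sublist _)
  have hlen : (a :: q).dropLast.length ≤ (PySem.Dict.ofList d).keys.length := by
    calc (a :: q).dropLast.length
        = (a :: q).dropLast.toFinset.card := (List.toFinset_card_of_nodup hnd').symm
      _ ≤ (PySem.Dict.ofList d).keys.toFinset.card := Finset.card_le_card (fun y hy => by
          simp only [List.mem_toFinset] at *
          exact hkeys y hy)
      _ ≤ (PySem.Dict.ofList d).keys.length := List.toFinset_card_le _
  have h1 : (a :: q).dropLast.length = q.length := by simp
  have h2 := keys_ofList_len d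
  omega

-- Dict lemmas
theorem insert_eq_self {κ ν : Type} [BEq κ] [LawfulBEq κ] (r : PySem.Dict κ ν) (k : κ) (v : ν)
    (hnd : r.keys.Nodup) (hv : r.get? k = some v) : r.insert k v = r := by
  have hc : r.contains k = true := by
    rw [PySem.Dict.contains_eq_isSome_get?, hv]; rfl
  apply PySem.Dict.ext
  have hpt : ∀ p ∈ r.items, (if (p.1 == k) = true then (k, v) else p) = p := by
    intro p hp
    obtain ⟨p1, p2⟩ := p
    by_cases hpk : (p1 == k) = true
    · have hk : p1 = k := eq_of_beq hpk
      subst hk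
      have h2 : r.get? p1 = some p2 := PySem.Dict.get?_of_mem_items r hp hnd
      rw [hv] at h2
      have hv2 : p2 = v := by injection h2.symm
      simp [hv2]
    · simp [hpk]
  rw [PySem.Dict.items_insert_of_contains r v hc, List.map_congr_left hpt, List.map_id']

theorem update_eq_self {κ ν : Type} [BEq κ] [LawfulBEq κ] (ps : List (κ × ν)) :
    ∀ (r : PySem.Dict κ ν), r.keys.Nodup → (∀ p ∈ ps, r.get? p.1 = some p.2) → r.update ps = r := by
  induction ps with
  | nil => intro r _ _; rfl
  | cons p tl ih =>
    intro r hnd hv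
    have h1 : r.insert p.1 p.2 = r := insert_eq_self r p.1 p.2 hnd (hv p (List.mem_cons_self ..))
    show (r.insert p.1 p.2).update tl = r
    rw [h1]
    exact ih r hnd (fun q hq => hv q (List.mem_cons_of_mem p hq))

theorem get?_update_cases {κ ν : Type} [BEq κ] [LawfulBEq κ] [DecidableEq κ] (ps : List (κ × ν)) :
    ∀ (r : PySem.Dict κ ν) (k : κ), (r.update ps).get? k = r.get? k ∨
      ∃ p ∈ ps, p.1 = k ∧ (r.update ps).get? k = some p.2 := by
  induction ps with
  | nil => intro r k; left; rfl
  | cons p tl ih =>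
    intro r k
    rcases ih (r.insert p.1 p.2) k with h | ⟨q, hq, hqk, hval⟩
    · by_cases hk : k = p.1
      · right
        refine ⟨p, List.mem_cons_self .., hk.symm, ?_⟩
        show ((r.insert p.1 p.2).update tl).get? k = some p.2
        rw [h, PySem.Dict.get?_insert, if_pos hk]
      · left
        show ((r.insert p.1 p.2).update tl).get? k = r.get? k
        rw [h, PySem.Dict.get?_insert, if_neg hk]
    · right
      exact ⟨q, List.mem_cons_of_mem p hq, hqk, hval⟩

theorem insert_insert_comm_of_mem {κ ν : Type} [BEq κ] [LawfulBEq κ] (r : PySem.Dict κ ν)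
    (k k' : κ) (v w : ν) (h : r.contains k = true) (hne : k' ≠ k) :
    (r.insert k v).insert k' w = (r.insert k' w).insert k v := by
  have hbne : (k' == k) = false := beq_eq_false_iff_ne.mpr hne
  have hbne' : (k == k') = false := beq_eq_false_iff_ne.mpr (Ne.symm hne)
  have hc1 : (r.insert k v).contains k' = r.contains k' := by
    rw [PySem.Dict.contains_insert, hbne]; simp
  have hc2 : (r.insert k' w).contains k = true := by
    rw [PySem.Dict.contains_insert, h]; simp
  by_cases hck' : r.contains k' = true
  · apply PySem.Dict.ext
    rw [PySem.Dict.items_insert_of_contains (r.insert k v) w (hc1.trans hck'),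
        PySem.Dict.items_insert_of_contains r v h,
        PySem.Dict.items_insert_of_contains (r.insert k' w) v hc2,
        PySem.Dict.items_insert_of_contains r w hck']
    rw [List.map_map, List.map_map]
    apply List.map_congr_left
    intro p _
    simp only [Function.comp_apply]
    by_cases h1 : (p.1 == k) = true
    · have h2 : (p.1 == k') = false := by
        rw [beq_eq_false_iff_ne]
        intro hh; rw [eq_of_beq h1] at hh; exact hne hh.symm
      simp [h1, h2, hbne']
    · by_cases h2 : (p.1 == k') = true
      · simp [bool_false_of_not_true h1, h2, hbne]
      · simp [bool_false_of_not_true h1, bool_false_of_not_true h2]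
  · have hck'f : r.contains k' = false := bool_false_of_not_true hck'
    apply PySem.Dict.ext
    rw [PySem.Dict.items_insert_of_not_contains (r.insert k v) w (hc1.trans hck'f),
        PySem.Dict.items_insert_of_contains r v h,
        PySem.Dict.items_insert_of_contains (r.insert k' w) v hc2,
        PySem.Dict.items_insert_of_not_contains r w hck'f]
    rw [List.map_append]
    simp [hbne]

theorem insert_update_comm {κ ν : Type} [BEq κ] [LawfulBEq κ] (ps : List (κ × ν)) :
    ∀ (r : PySem.Dict κ ν) (k : κ) (v : ν), r.contains k = true → (∀ p ∈ ps, p.1 ≠ k) →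
      (r.update ps).insert k v = (r.insert k v).update ps := by
  induction ps with
  | nil => intro r k v _ _; rfl
  | cons p tl ih =>
    intro r k v h hk
    show ((r.insert p.1 p.2).update tl).insert k v = ((r.insert k v).insert p.1 p.2).update tl
    rw [ih (r.insert p.1 p.2) k v
        (by rw [PySem.Dict.contains_insert, h]; simp)
        (fun q hq => hk q (List.mem_cons_of_mem p hq))]
    rw [insert_insert_comm_of_mem r k p.1 v p.2 h (hk p (List.mem_cons_self ..))]

theorem update_map_repl {κ ν : Type} [BEq κ] [LawfulBEq κ] (l : List (κ × ν)) :
    ∀ (a : PySem.Dict κ ν) (k : κ) (v : ν), (l.map Prod.fst).Nodup → k ∈ l.map Prod.fst →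
      a.update (l.map (fun p => if (p.1 == k) = true then (k, v) else p)) = (a.update l).insert k v := by
  induction l with
  | nil => intro a k v _ hmem; simp at hmem
  | cons p tl ih =>
    intro a k v hnd hmem
    have hnd' : (tl.map Prod.fst).Nodup := (List.nodup_cons.mp hnd).2
    have hpnotin : p.1 ∉ tl.map Prod.fst := (List.nodup_cons.mp hnd).1
    rw [List.map_cons]
    by_cases hpk : (p.1 == k) = true
    · have hk : p.1 = k := eq_of_beq hpk
      have htl : tl.map (fun q => if (q.1 == k) = true then (k, v) else q) = tl := by
        have hpt : ∀ q ∈ tl, (if (q.1 == k) = true then (k, v) else q) = q := by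
          intro q hq
          have hqk : q.1 ≠ k := by
            intro hh
            apply hpnotin
            rw [hk, ← hh]
            exact List.mem_map.mpr ⟨q, hq, rfl⟩
          simp [beq_eq_false_iff_ne.mpr hqk]
        rw [List.map_congr_left hpt, List.map_id']
      rw [if_pos hpk]
      show (a.insert k v).update (tl.map _) = ((a.insert p.1 p.2).update tl).insert k v
      rw [htl, hk]
      rw [insert_update_comm tl (a.insert k p.2) k v (PySem.Dict.contains_insert_self _ _ _)
        (fun q hq hqq => hpnotin (by rw [hk, ← hqq]; exact List.mem_map.mpr ⟨q, hq, rfl⟩))]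
      rw [PySem.Dict.insert_insert_self]
    · have hk : k ∈ tl.map Prod.fst := by
        rcases List.mem_map.mp hmem with ⟨q, hq, hq1⟩
        rcases List.mem_cons.mp hq with rfl | hq
        · exact absurd (by simp [hq1]) hpk
        · exact List.mem_map.mpr ⟨q, hq, hq1⟩
      rw [if_neg hpk]
      show (a.insert p.1 p.2).update (tl.map _) = ((a.insert p.1 p.2).update tl).insert k v
      exact ih (a.insert p.1 p.2) k v hnd' hk

theorem update_insert_items {κ ν : Type} [BEq κ] [LawfulBEq κ] (a b : PySem.Dict κ ν)
    (k : κ) (v : ν) (hb : b.keys.Nodup) :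
    a.update ((b.insert k v).items) = (a.update b.items).insert k v := by
  by_cases hc : b.contains k = true
  · rw [PySem.Dict.items_insert_of_contains b v hc]
    exact update_map_repl b.items a k v hb ((PySem.Dict.contains_iff_mem_keys _ _).mp hc)
  · rw [PySem.Dict.items_insert_of_not_contains b v (bool_false_of_not_true hc)]
    show List.foldl _ a (b.items ++ [(k, v)]) = _
    rw [List.foldl_append]
    rfl

theorem update_assoc {κ ν : Type} [BEq κ] [LawfulBEq κ] (ps : List (κ × ν)) :
    ∀ (a b : PySem.Dict κ ν), b.keys.Nodup →
      a.update ((b.update ps).items) = (a.update b.items).update ps := by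
  induction ps with
  | nil => intro a b _; rfl
  | cons p tl ih =>
    intro a b hb
    show a.update (((b.insert p.1 p.2).update tl).items) = ((a.update b.items).insert p.1 p.2).update tl
    rw [ih a (b.insert p.1 p.2) (PySem.Dict.nodup_keys_insert _ _ _ hb)]
    rw [update_insert_items a b p.1 p.2 hb]

-- A's result has nodup keys
theorem goA_nodup (dd : PySem.Dict Int (List Int)) : ∀ (f : Nat) (n : Int), (goA dd f n).keys.Nodup := by
  intro f
  induction f with
  | zero => intro n; exact PySem.Dict.nodup_keys_empty
  | succ f ih =>
    intro n
    by_cases hc : dd.contains n = true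
    · have hgoA : goA dd (f + 1) n =
          (dd.getD n []).foldl (fun r l => r.update (goA dd f l).items)
            ((PySem.Dict.empty : PySem.Dict Int (List Int)).insert n (dd.getD n [])) := by
        simp [goA, hc]
      rw [hgoA]
      have base : ((PySem.Dict.empty : PySem.Dict Int (List Int)).insert n (dd.getD n [])).keys.Nodup :=
        PySem.Dict.nodup_keys_insert _ _ _ PySem.Dict.nodup_keys_empty
      generalize (PySem.Dict.empty : PySem.Dict Int (List Int)).insert n (dd.getD n []) = s at base ⊢
      induction dd.getD n [] generalizing s with
      | nil => exact base
      | cons c tl ihl => exact ihl _ (PySem.Dict.nodup_keys_update _ _ base)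
    · have hgoA : goA dd (f + 1) n = PySem.Dict.empty := by
        simp [goA, bool_false_of_not_true hc]
      rw [hgoA]
      exact PySem.Dict.nodup_keys_empty

-- every binding A produces is a binding of dd at a node reachable from n
theorem goA_sound (dd : PySem.Dict Int (List Int)) : ∀ (f : Nat) (n : Int) (k : Int) (v : List Int),
    (goA dd f n).get? k = some v → KReach dd n k ∧ dd.get? k = some v := by
  intro f
  induction f with
  | zero =>
    intro n k v h
    rw [goA, PySem.Dict.get?_empty] at h
    exact absurd h (by simp)
  | succ f ih =>
    intro n k v h
    by_cases hc : dd.contains n = true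
    · have hgoA : goA dd (f + 1) n =
          (dd.getD n []).foldl (fun r l => r.update (goA dd f l).items)
            ((PySem.Dict.empty : PySem.Dict Int (List Int)).insert n (dd.getD n [])) := by
        simp [goA, hc]
      rw [hgoA] at h
      have hddn : dd.get? n = some (dd.getD n []) := by
        rw [PySem.Dict.contains_eq_isSome_get?] at hc
        cases hx : dd.get? n with
        | none => rw [hx] at hc; simp at hc
        | some w => rw [PySem.Dict.getD_eq_get?_getD, hx]; rfl
      have base : ∀ k v, ((PySem.Dict.empty : PySem.Dict Int (List Int)).insert n (dd.getD n [])).get? k = some v →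
          KReach dd n k ∧ dd.get? k = some v := by
        intro k v hv
        rw [PySem.Dict.get?_insert] at hv
        by_cases hkn : k = n
        · rw [if_pos hkn] at hv
          have hveq : v = dd.getD n [] := by injection hv.symm
          refine ⟨by rw [hkn]; exact KReach.refl n, by rw [hkn, hddn, hveq]⟩
        · rw [if_neg hkn, PySem.Dict.get?_empty] at hv
          exact absurd hv (by simp)
      have hfold : ∀ (l : List Int), (∀ c ∈ l, c ∈ dd.getD n []) →
          ∀ (s : PySem.Dict Int (List Int)),
            (∀ k v, s.get? k = some v → KReach dd n k ∧ dd.get? k = some v) →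
            ∀ k v, (l.foldl (fun r c => r.update (goA dd f c).items) s).get? k = some v →
              KReach dd n k ∧ dd.get? k = some v := by
        intro l
        induction l with
        | nil => intro _ s hs k v hv; exact hs k v hv
        | cons c tl ihl =>
          intro hsub s hs k v hv
          refine ihl (fun c' hc' => hsub c' (List.mem_cons_of_mem c hc')) _ ?_ k v hv
          intro k' v' hv'
          rcases get?_update_cases (goA dd f c).items s k' with hcase | ⟨p, hp, hpk, hval⟩
          · exact hs k' v' (hcase ▸ hv')
          · obtain ⟨p1, p2⟩ := p
            have hpv : p2 = v' := by
              rw [hval] at hv'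
              injection hv'
            have hA : (goA dd f c).get? p1 = some p2 :=
              PySem.Dict.get?_of_mem_items _ hp (goA_nodup dd f c)
            obtain ⟨hr, hd⟩ := ih c p1 p2 hA
            refine ⟨?_, ?_⟩
            · rw [← hpk]
              exact KReach.step n c p1 hc (hsub c (List.mem_cons_self ..)) hr
            · rw [← hpk, ← hpv]
              exact hd
      exact hfold (dd.getD n []) (fun _ h => h) _ base k v h
    · have hgoA : goA dd (f + 1) n = PySem.Dict.empty := by
        simp [goA, bool_false_of_not_true hc]
      rw [hgoA, PySem.Dict.get?_empty] at h
      exact absurd h (by simp)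

-- the invariant carried through the DFS: r has nodup keys, r agrees with dd, and r is closed
-- under children except at the gray nodes G (the current recursion stack)
def InvG (dd : PySem.Dict Int (List Int)) (r : PySem.Dict Int (List Int)) (G : List Int) : Prop :=
  r.keys.Nodup ∧
  (∀ k v, r.get? k = some v → dd.get? k = some v) ∧
  (∀ k, r.contains k = true → k ∉ G → ∀ c ∈ dd.getD k [], dd.contains c = true → r.contains c = true)

theorem closed_reach (dd : PySem.Dict Int (List Int)) (r : PySem.Dict Int (List Int)) (G : List Int)
    (hI : InvG dd r G) {n k : Int} (h : KReach dd n k) :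
    (∀ g ∈ G, ¬ KReach dd n g) → r.contains n = true → dd.contains k = true →
    r.contains k = true := by
  induction h with
  | refl n => intro _ hn _; exact hn
  | step n c k hn' hc hck ih =>
    intro hG hrn hk
    have hnG : n ∉ G := fun hmem => hG n hmem (KReach.refl n)
    have hcKey : dd.contains c = true := kreach_key hck hk
    have hrc := hI.2.2 n hrn hnG c hc hcKey
    exact ih (fun g hg hr => hG g hg (KReach.step n c g hn' hc hr)) hrc hk

def unvis (dd r : PySem.Dict Int (List Int)) : Nat :=
  dd.keys.countP (fun k => !(r.contains k))

theorem unvis_insert (dd r : PySem.Dict Int (List Int)) (n : Int) (dn : List Int)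
    (hdd : dd.keys.Nodup) (hn : n ∈ dd.keys) (hrn : r.contains n = false) :
    unvis dd (r.insert n dn) + 1 = unvis dd r := by
  have hperm : dd.keys.Perm (n :: dd.keys.erase n) := List.perm_cons_erase hn
  unfold unvis
  rw [hperm.countP_eq, hperm.countP_eq, List.countP_cons, List.countP_cons]
  have h1 : (!(r.insert n dn).contains n) = false := by
    rw [PySem.Dict.contains_insert_self]; rfl
  have h2 : (!r.contains n) = true := by rw [hrn]; rfl
  have hpt : ∀ k ∈ dd.keys.erase n, (!(r.insert n dn).contains k) = (!r.contains k) := by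
    intro k hk
    have hne : (k == n) = false := by
      rw [beq_eq_false_iff_ne]
      intro hh
      exact (hdd.not_mem_erase) (hh ▸ hk)
    rw [PySem.Dict.contains_insert, hne]
    simp
  have hcong : (dd.keys.erase n).countP (fun k => !(r.insert n dn).contains k) =
      (dd.keys.erase n).countP (fun k => !r.contains k) := by
    rw [List.countP_eq_length_filter, List.countP_eq_length_filter, List.filter_congr hpt]
  rw [h1, h2, hcong]
  simp

theorem unvis_le (dd r : PySem.Dict Int (List Int)) : unvis dd r ≤ dd.keys.length :=
  List.countP_le_length

-- distribute an outer update through A's fold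
theorem foldA_dist (dd : PySem.Dict Int (List Int)) (f : Nat) (l : List Int) :
    ∀ (a s : PySem.Dict Int (List Int)), s.keys.Nodup →
      a.update ((l.foldl (fun t c => t.update (goA dd f c).items) s).items) =
        l.foldl (fun t c => t.update (goA dd f c).items) (a.update s.items) := by
  induction l with
  | nil => intro a s _; rfl
  | cons c tl ih =>
    intro a s hs
    show a.update ((tl.foldl _ (s.update (goA dd f c).items)).items) =
      tl.foldl _ ((a.update s.items).update (goA dd f c).items)
    rw [ih a _ (PySem.Dict.nodup_keys_update _ _ hs)]
    rw [update_assoc _ a s hs]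

-- the main simulation lemma: the one-node DFS equals A's update of goA's items
theorem mainM (dd : PySem.Dict Int (List Int)) (x : Int) (hdd : dd.keys.Nodup)
    (hNC : ∀ n, KReach dd x n → dd.contains n = true → ∀ c ∈ dd.getD n [], ¬ KReach dd c n) :
    ∀ (f : Nat) (n : Int) (r : PySem.Dict Int (List Int)) (G : List Int),
      KReach dd x n →
      (∀ g ∈ G, ¬ KReach dd n g) →
      InvG dd r G →
      unvis dd r < f →
      goB dd f n r = r.update ((goA dd f n).items) ∧
      InvG dd (goB dd f n r) G ∧
      (∀ k, r.contains k = true → (goB dd f n r).contains k = true) ∧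
      unvis dd (goB dd f n r) ≤ unvis dd r ∧
      (dd.contains n = true → (goB dd f n r).contains n = true) := by
  intro f
  induction f with
  | zero => intro n r G _ _ _ hlt; omega
  | succ f ihf =>
    intro n r G hxn hG hI hlt
    by_cases hrn : r.contains n = true
    · have hgoB : goB dd (f + 1) n r = r := by simp [goB, hrn]
      have heq : r.update ((goA dd (f + 1) n).items) = r := by
        apply update_eq_self _ r hI.1
        intro p hp
        obtain ⟨p1, p2⟩ := p
        have hA : (goA dd (f + 1) n).get? p1 = some p2 :=
          PySem.Dict.get?_of_mem_items _ hp (goA_nodup dd (f + 1) n)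
        obtain ⟨hr, hd⟩ := goA_sound dd (f + 1) n p1 p2 hA
        have hkKey : dd.contains p1 = true := by
          rw [PySem.Dict.contains_eq_isSome_get?, hd]; rfl
        have hrk : r.contains p1 = true := closed_reach dd r G hI hr hG hrn hkKey
        have hex : ∃ w, r.get? p1 = some w := by
          rw [PySem.Dict.contains_eq_isSome_get?] at hrk
          cases hx : r.get? p1 with
          | none => rw [hx] at hrk; simp at hrk
          | some w => exact ⟨w, rfl⟩
        obtain ⟨w, hw⟩ := hex
        have hdw := hI.2.1 p1 w hw
        rw [hdw] at hd
        have hweq : w = p2 := by injection hd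
        rw [hw, hweq]
      rw [hgoB, heq]
      exact ⟨rfl, hI, fun k h => h, le_rfl, fun _ => hrn⟩
    · have hrnf : r.contains n = false := bool_false_of_not_true hrn
      by_cases hdn : dd.contains n = true
      · have hgoB : goB dd (f + 1) n r =
            (dd.getD n []).foldl (fun r c => goB dd f c r) (r.insert n (dd.getD n [])) := by
          simp [goB, hrnf, hdn]
        have hgoA : goA dd (f + 1) n =
            (dd.getD n []).foldl (fun t l => t.update (goA dd f l).items)
              ((PySem.Dict.empty : PySem.Dict Int (List Int)).insert n (dd.getD n [])) := by
          simp [goA, hdn]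
        have hddn : dd.get? n = some (dd.getD n []) := by
          rw [PySem.Dict.contains_eq_isSome_get?] at hdn
          cases hx : dd.get? n with
          | none => rw [hx] at hdn; simp at hdn
          | some w => rw [PySem.Dict.getD_eq_get?_getD, hx]; rfl
        have hdn' : dd.contains n = true := by
          rw [PySem.Dict.contains_eq_isSome_get?, hddn]; rfl
        have hnkey : n ∈ dd.keys := (PySem.Dict.contains_iff_mem_keys _ _).mp hdn'
        have hun1 : unvis dd (r.insert n (dd.getD n [])) + 1 = unvis dd r :=
          unvis_insert dd r n (dd.getD n []) hdd hnkey hrnf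
        have hlt1 : unvis dd (r.insert n (dd.getD n [])) < f := by omega
        have hI1 : InvG dd (r.insert n (dd.getD n [])) (n :: G) := by
          refine ⟨PySem.Dict.nodup_keys_insert _ _ _ hI.1, ?_, ?_⟩
          · intro k v hv
            rw [PySem.Dict.get?_insert] at hv
            by_cases hkn : k = n
            · rw [if_pos hkn] at hv
              have hveq : v = dd.getD n [] := by injection hv.symm
              rw [hkn, hveq]; exact hddn
            · rw [if_neg hkn] at hv
              exact hI.2.1 k v hv
          · intro k hk hkG c hc hck
            have hkn : k ≠ n := fun hh => hkG (hh ▸ List.mem_cons_self ..)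
            have hkG' : k ∉ G := fun hh => hkG (List.mem_cons_of_mem n hh)
            rw [PySem.Dict.contains_insert, beq_eq_false_iff_ne.mpr hkn] at hk
            simp only [Bool.false_or] at hk
            have hrc := hI.2.2 k hk hkG' c hc hck
            rw [PySem.Dict.contains_insert, hrc]
            simp
        have hNCn : ∀ c ∈ dd.getD n [], ¬ KReach dd c n := hNC n hxn hdn'
        have hGc : ∀ c ∈ dd.getD n [], ∀ g ∈ n :: G, ¬ KReach dd c g := by
          intro c hc g hg hreach
          rcases List.mem_cons.mp hg with rfl | hg'
          · exact hNCn c hc hreach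
          · exact hG g hg' (KReach.step n c g hdn' hc hreach)
        have hxc : ∀ c ∈ dd.getD n [], KReach dd x c := fun c hc => kreach_snoc dd hxn hdn' hc
        have hFOLD : ∀ (l : List Int), (∀ c ∈ l, c ∈ dd.getD n []) →
            ∀ (s : PySem.Dict Int (List Int)), InvG dd s (n :: G) → unvis dd s < f →
              (l.foldl (fun r c => goB dd f c r) s =
                l.foldl (fun t c => t.update (goA dd f c).items) s) ∧
              InvG dd (l.foldl (fun r c => goB dd f c r) s) (n :: G) ∧
              (∀ k, s.contains k = true → (l.foldl (fun r c => goB dd f c r) s).contains k = true) ∧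
              unvis dd (l.foldl (fun r c => goB dd f c r) s) ≤ unvis dd s ∧
              (∀ c ∈ l, dd.contains c = true → (l.foldl (fun r c => goB dd f c r) s).contains c = true) := by
          intro l
          induction l with
          | nil =>
            intro _ s hs hsf
            exact ⟨rfl, hs, fun k h => h, le_rfl, fun c hc => absurd hc List.not_mem_nil⟩
          | cons c tl ihl =>
            intro hsub s hs hsf
            have hcdn : c ∈ dd.getD n [] := hsub c (List.mem_cons_self ..)
            obtain ⟨hEQ, hI2, hm2, hu2, hc2⟩ :=
              ihf c s (n :: G) (hxc c hcdn) (hGc c hcdn) hs hsf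
            obtain ⟨hEQ', hI3, hm3, hu3, hc3⟩ :=
              ihl (fun c' hc' => hsub c' (List.mem_cons_of_mem c hc')) (goB dd f c s) hI2
                (lt_of_le_of_lt hu2 hsf)
            refine ⟨?_, hI3, ?_, ?_, ?_⟩
            · show tl.foldl _ (goB dd f c s) = tl.foldl _ (s.update (goA dd f c).items)
              rw [← hEQ]
              exact hEQ'
            · intro k hk
              exact hm3 k (hm2 k hk)
            · exact le_trans hu3 hu2
            · intro c' hc' hkey
              rcases List.mem_cons.mp hc' with rfl | hc''
              · exact hm3 c' (hc2 hkey)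
              · exact hc3 c' hc'' hkey
        obtain ⟨hEQ, hIF, hmF, huF, hcF⟩ :=
          hFOLD (dd.getD n []) (fun _ h => h) (r.insert n (dd.getD n [])) hI1 hlt1
        have hs0 : ((PySem.Dict.empty : PySem.Dict Int (List Int)).insert n (dd.getD n [])).items =
            [(n, dd.getD n [])] := by
          rw [PySem.Dict.items_insert_of_not_contains PySem.Dict.empty (dd.getD n [])
            (PySem.Dict.contains_empty n)]
          rfl
        have hrw : r.update ((goA dd (f + 1) n).items) =
            (dd.getD n []).foldl (fun t c => t.update (goA dd f c).items) (r.insert n (dd.getD n [])) := by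
          rw [hgoA, foldA_dist dd f _ r _ (PySem.Dict.nodup_keys_insert _ _ _ PySem.Dict.nodup_keys_empty)]
          rw [hs0]
          rfl
        have hmono : ∀ k, r.contains k = true → (goB dd (f + 1) n r).contains k = true := by
          intro k hk
          rw [hgoB]
          apply hmF
          rw [PySem.Dict.contains_insert, hk]
          simp
        refine ⟨?_, ?_, hmono, ?_, ?_⟩
        · rw [hgoB, hrw, hEQ]
        · rw [hgoB]
          refine ⟨hIF.1, hIF.2.1, ?_⟩
          intro k hk hkG c hc hck
          by_cases hkn : k = n
          · subst hkn
            exact hcF c hc hck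
          · exact hIF.2.2 k hk (by
              intro hh
              rcases List.mem_cons.mp hh with h1 | h1
              · exact hkn h1
              · exact hkG h1) c hc hck
        · rw [hgoB]
          calc unvis dd ((dd.getD n []).foldl (fun r c => goB dd f c r) (r.insert n (dd.getD n []))) ≤
              unvis dd (r.insert n (dd.getD n [])) := huF
            _ ≤ unvis dd r := by omega
        · intro _
          rw [hgoB]
          apply hmF
          exact PySem.Dict.contains_insert_self _ _ _
      · have hdnf : dd.contains n = false := bool_false_of_not_true hdn
        have hgoB : goB dd (f + 1) n r = r := by simp [goB, hdnf]
        have hgoA : goA dd (f + 1) n = PySem.Dict.empty := by simp [goA, hdnf]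
        have heq : r.update ((goA dd (f + 1) n).items) = r := by rw [hgoA]; rfl
        rw [hgoB, heq]
        exact ⟨rfl, hI, fun k h => h, le_rfl, fun hh => absurd hh (by rw [hdnf]; simp)⟩

-- goB ignores its fuel as long as the fuel exceeds the number of unvisited keys,
-- and never increases that number
theorem goB_fuel (dd : PySem.Dict Int (List Int)) (hdd : dd.keys.Nodup) :
    ∀ (f : Nat) (n : Int) (r : PySem.Dict Int (List Int)), unvis dd r < f →
      unvis dd (goB dd f n r) ≤ unvis dd r ∧
      (∀ f', unvis dd r < f' → goB dd f n r = goB dd f' n r) := by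
  intro f
  induction f with
  | zero => intro n r h; exact absurd h (Nat.not_lt_zero _)
  | succ f ih =>
    intro n r hr
    by_cases hc : (r.contains n || !(dd.contains n)) = true
    · have hB : goB dd (f + 1) n r = r := by simp only [goB, if_pos hc]
      refine ⟨by rw [hB], fun f' hf' => ?_⟩
      cases f' with
      | zero => exact absurd hf' (Nat.not_lt_zero _)
      | succ f'' => rw [hB]; simp only [goB, if_pos hc]
    · have hrn : r.contains n = false := by
        cases hcr : r.contains n
        · rfl
        · rw [hcr] at hc; simp at hc
      have hdn : dd.contains n = true := by
        cases hcd : dd.contains n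
        · rw [hcd, hrn] at hc; simp at hc
        · rfl
      have hnkey : n ∈ dd.keys := (PySem.Dict.contains_iff_mem_keys _ _).mp hdn
      have hun : unvis dd (r.insert n (dd.getD n [])) + 1 = unvis dd r :=
        unvis_insert dd r n (dd.getD n []) hdd hnkey hrn
      have hB : goB dd (f + 1) n r =
          (dd.getD n []).foldl (fun r c => goB dd f c r) (r.insert n (dd.getD n [])) := by
        simp [goB, hrn, hdn]
      have hFOLD : ∀ (l : List Int) (s : PySem.Dict Int (List Int)), unvis dd s < f →
          unvis dd (l.foldl (fun r c => goB dd f c r) s) ≤ unvis dd s ∧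
          (∀ f'', unvis dd s < f'' → l.foldl (fun r c => goB dd f c r) s =
            l.foldl (fun r c => goB dd f'' c r) s) := by
        intro l
        induction l with
        | nil => exact fun s _ => ⟨le_rfl, fun _ _ => rfl⟩
        | cons c tl ihl =>
          intro s hs
          obtain ⟨hu, heq⟩ := ih c s hs
          obtain ⟨hu2, heq2⟩ := ihl (goB dd f c s) (lt_of_le_of_lt hu hs)
          refine ⟨le_trans hu2 hu, fun f'' hf'' => ?_⟩
          show tl.foldl _ (goB dd f c s) = tl.foldl _ (goB dd f'' c s)
          rw [← heq f'' hf'']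
          exact heq2 f'' (lt_of_le_of_lt hu hf'')
      have hsf : unvis dd (r.insert n (dd.getD n [])) < f := by omega
      obtain ⟨hu, heq⟩ := hFOLD (dd.getD n []) (r.insert n (dd.getD n [])) hsf
      refine ⟨by rw [hB]; omega, fun f' hf' => ?_⟩
      cases f' with
      | zero => exact absurd hf' (Nat.not_lt_zero _)
      | succ f'' =>
        have hB' : goB dd (f'' + 1) n r =
            (dd.getD n []).foldl (fun r c => goB dd f'' c r) (r.insert n (dd.getD n [])) := by
          simp [goB, hrn, hdn]
        rw [hB, hB']
        exact heq f'' (by omega)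

-- a fold of goB over a stack likewise ignores the fuel and never increases `unvis`
theorem goB_foldl_fuel (dd : PySem.Dict Int (List Int)) (hdd : dd.keys.Nodup) (f : Nat) :
    ∀ (l : List Int) (s : PySem.Dict Int (List Int)), unvis dd s < f →
      unvis dd (l.foldl (fun r c => goB dd f c r) s) ≤ unvis dd s ∧
      (∀ f', unvis dd s < f' → l.foldl (fun r c => goB dd f c r) s =
        l.foldl (fun r c => goB dd f' c r) s) := by
  intro l
  induction l with
  | nil => exact fun s _ => ⟨le_rfl, fun _ _ => rfl⟩
  | cons c tl ihl =>
    intro s hs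
    obtain ⟨hu, heq⟩ := goB_fuel dd hdd f c s hs
    obtain ⟨hu2, heq2⟩ := ihl (goB dd f c s) (lt_of_le_of_lt hu hs)
    refine ⟨le_trans hu2 hu, fun f' hf' => ?_⟩
    show tl.foldl _ (goB dd f c s) = tl.foldl _ (goB dd f' c s)
    rw [← heq f' hf']
    exact heq2 f' (lt_of_le_of_lt hu hf')

-- potential: remaining work of the stack machine coming from unvisited keys
def pot (dd r : PySem.Dict Int (List Int)) : Nat :=
  ((dd.keys.filter (fun k => !(r.contains k))).map (fun k => (dd.getD k []).length + 1)).sum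

theorem pot_insert (dd r : PySem.Dict Int (List Int)) (n : Int)
    (hdd : dd.keys.Nodup) (hn : n ∈ dd.keys) (hrn : r.contains n = false) :
    pot dd (r.insert n (dd.getD n [])) + ((dd.getD n []).length + 1) = pot dd r := by
  have hperm : dd.keys.Perm (n :: dd.keys.erase n) := List.perm_cons_erase hn
  have hpt : ∀ k ∈ dd.keys.erase n, (!(r.insert n (dd.getD n [])).contains k) = (!r.contains k) := by
    intro k hk
    have hne : (k == n) = false := by
      rw [beq_eq_false_iff_ne]
      intro hh
      exact (hdd.not_mem_erase) (hh ▸ hk)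
    rw [PySem.Dict.contains_insert, hne]
    simp
  have h1 : pot dd (r.insert n (dd.getD n [])) =
      (((dd.keys.erase n).filter (fun k => !(r.contains k))).map
        (fun k => (dd.getD k []).length + 1)).sum := by
    unfold pot
    rw [((hperm.filter _).map _).sum_eq, List.filter_cons]
    have hfn : (!(r.insert n (dd.getD n [])).contains n) = false := by
      rw [PySem.Dict.contains_insert_self]; rfl
    rw [hfn]
    simp only [Bool.false_eq_true, if_false]
    rw [List.filter_congr hpt]
  have h2 : pot dd r =
      ((dd.getD n []).length + 1) +
      (((dd.keys.erase n).filter (fun k => !(r.contains k))).map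
        (fun k => (dd.getD k []).length + 1)).sum := by
    unfold pot
    rw [((hperm.filter _).map _).sum_eq, List.filter_cons]
    have hfn : (!r.contains n) = true := by rw [hrn]; rfl
    rw [hfn]
    simp
  omega

theorem pot_le (dd r : PySem.Dict Int (List Int)) (hdd : dd.keys.Nodup) :
    pot dd r ≤ ((dd.items.map (fun p => p.2.length + 1)).sum) := by
  have hsub : ((dd.keys.filter (fun k => !(r.contains k))).map
      (fun k => (dd.getD k []).length + 1)).Sublist
      (dd.keys.map (fun k => (dd.getD k []).length + 1)) :=
    List.filter_sublist.map _
  have h1 : pot dd r ≤ (dd.keys.map (fun k => (dd.getD k []).length + 1)).sum :=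
    hsub.sum_le_sum (fun a _ => Nat.zero_le a)
  have hkeys : dd.keys = dd.items.map Prod.fst := rfl
  have h2 : dd.keys.map (fun k => (dd.getD k []).length + 1) =
      dd.items.map (fun p => p.2.length + 1) := by
    rw [hkeys, List.map_map]
    apply List.map_congr_left
    intro p hp
    have hg : dd.get? p.1 = some p.2 := PySem.Dict.get?_of_mem_items dd hp hdd
    simp only [Function.comp_apply]
    rw [PySem.Dict.getD_eq_get?_getD, hg]
    rfl
  rw [h2] at h1
  exact h1

-- B's stack machine with sufficient fuel is the fold of the one-node DFS over the stack
theorem goS_steps (dd : PySem.Dict Int (List Int)) (hdd : dd.keys.Nodup) :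
    ∀ (F : Nat) (stack : List Int) (r : PySem.Dict Int (List Int)),
      stack.length + pot dd r ≤ F →
      goS dd F stack r =
        stack.foldl (fun r n => goB dd (dd.keys.length + 1) n r) r := by
  intro F
  induction F with
  | zero =>
    intro stack r h
    cases stack with
    | nil => rfl
    | cons n tl => simp at h
  | succ F ih =>
    intro stack r h
    cases stack with
    | nil => rfl
    | cons n tl =>
      have hur : unvis dd r < dd.keys.length + 1 := Nat.lt_succ_of_le (unvis_le dd r)
      by_cases hc : (r.contains n || !(dd.contains n)) = true
      · have hS : goS dd (F + 1) (n :: tl) r = goS dd F tl r := by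
          simp only [goS, if_pos hc]
        have hB : goB dd (dd.keys.length + 1) n r = r := by
          simp only [goB, if_pos hc]
        rw [hS, ih tl r (by simp at h ⊢; omega)]
        simp only [List.foldl_cons, hB]
      · have hrn : r.contains n = false := by
          cases hcr : r.contains n
          · rfl
          · rw [hcr] at hc; simp at hc
        have hdn : dd.contains n = true := by
          cases hcd : dd.contains n
          · rw [hcd, hrn] at hc; simp at hc
          · rfl
        have hnkey : n ∈ dd.keys := (PySem.Dict.contains_iff_mem_keys _ _).mp hdn
        have hpot : pot dd (r.insert n (dd.getD n [])) + ((dd.getD n []).length + 1) = pot dd r :=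
          pot_insert dd r n hdd hnkey hrn
        have hun : unvis dd (r.insert n (dd.getD n [])) + 1 = unvis dd r :=
          unvis_insert dd r n (dd.getD n []) hdd hnkey hrn
        have hS : goS dd (F + 1) (n :: tl) r =
            goS dd F (dd.getD n [] ++ tl) (r.insert n (dd.getD n [])) := by
          simp [goS, hrn, hdn]
        have hlen : (dd.getD n [] ++ tl).length + pot dd (r.insert n (dd.getD n [])) ≤ F := by
          simp only [List.length_append] at *
          simp at h
          omega
        rw [hS, ih _ _ hlen, List.foldl_append]
        have hs' : unvis dd (r.insert n (dd.getD n [])) < dd.keys.length := by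
          have := unvis_le dd r
          omega
        have hB : goB dd (dd.keys.length + 1) n r =
            (dd.getD n []).foldl (fun r c => goB dd dd.keys.length c r)
              (r.insert n (dd.getD n [])) := by
          simp [goB, hrn, hdn]
        have hfold := (goB_foldl_fuel dd hdd dd.keys.length (dd.getD n [])
          (r.insert n (dd.getD n [])) hs').2 (dd.keys.length + 1) (by omega)
        simp only [List.foldl_cons]
        rw [hB, hfold]

-- the items of a nodup-keys dict rebuild it
theorem empty_update_items {κ ν : Type} [BEq κ] [LawfulBEq κ] (b : PySem.Dict κ ν)
    (hb : b.keys.Nodup) : (PySem.Dict.empty : PySem.Dict κ ν).update b.items = PySem.Dict.mk b.items := by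
  have hfresh : ∀ p ∈ b.items, (PySem.Dict.empty : PySem.Dict κ ν).contains (Prod.fst p) = false :=
    fun p _ => PySem.Dict.contains_empty _
  have hnd : (b.items.map Prod.fst).Nodup := hb
  have hkey := PySem.Dict.items_foldl_insert_fresh b.items Prod.fst Prod.snd
    (PySem.Dict.empty : PySem.Dict κ ν) hfresh hnd
  apply PySem.Dict.ext
  show (List.foldl (fun acc p => acc.insert p.1 p.2) PySem.Dict.empty b.items).items = b.items
  rw [hkey]
  have hemp : (PySem.Dict.empty : PySem.Dict κ ν).items = [] := rfl
  rw [hemp]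
  simp

-- ===== VERDICT (by name: the statement is the Claim_ definition above) =====
theorem get_sottoalbero_spec : Claim_equal_get_sottoalbero := by
  intro d x _ hpre
  unfold Spec_get_sottoalbero get_sottoalbero get_sottoalbero_alt
  have hdd : (PySem.Dict.ofList d).keys.Nodup := PySem.Dict.nodup_keys_ofList d
  have hNC : ∀ n, KReach (PySem.Dict.ofList d) x n → (PySem.Dict.ofList d).contains n = true →
      ∀ c ∈ (PySem.Dict.ofList d).getD n [], ¬ KReach (PySem.Dict.ofList d) c n := by
    intro n hxn _ c hc hcn
    exact hpre n (kreach_reachN d hxn) c hc (kreach_reachN d hcn)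
  have hI : InvG (PySem.Dict.ofList d) PySem.Dict.empty [] := by
    refine ⟨PySem.Dict.nodup_keys_empty, ?_, ?_⟩
    · intro k v hv
      rw [PySem.Dict.get?_empty] at hv
      exact absurd hv (by simp)
    · intro k hk
      rw [PySem.Dict.contains_empty] at hk
      exact absurd hk (by simp)
  have h1 : unvis (PySem.Dict.ofList d) PySem.Dict.empty ≤ (PySem.Dict.ofList d).keys.length :=
    unvis_le _ _
  have h2 := keys_ofList_len d
  -- the stack machine run equals one goB call
  have hstack : goS (PySem.Dict.ofList d)
      (((PySem.Dict.ofList d).items.map (fun p => p.2.length + 1)).sum + 1) [x] PySem.Dict.empty =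
      goB (PySem.Dict.ofList d) ((PySem.Dict.ofList d).keys.length + 1) x PySem.Dict.empty := by
    rw [goS_steps (PySem.Dict.ofList d) hdd _ [x] PySem.Dict.empty (by
      have := pot_le (PySem.Dict.ofList d) PySem.Dict.empty hdd
      simp only [List.length_cons, List.length_nil]
      omega)]
    rfl
  -- the goB fuel can be raised to d.length + 1
  have hmono := (goB_fuel (PySem.Dict.ofList d) hdd ((PySem.Dict.ofList d).keys.length + 1) x
    PySem.Dict.empty (by omega)).2 (d.length + 1) (by omega)
  obtain ⟨hEQ, _, _, _, _⟩ :=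
    mainM (PySem.Dict.ofList d) x hdd hNC (d.length + 1) x PySem.Dict.empty []
      (KReach.refl x) (fun g hg => absurd hg List.not_mem_nil) hI (by omega)
  rw [hstack, hmono, hEQ]
  rw [empty_update_items _ (goA_nodup (PySem.Dict.ofList d) (d.length + 1) x)]
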